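-- pv_equiv track=rewrite | github.com/harshadpy/ATSResumeBuilder | utils/ai_enhancer.py | enhance_skills
-- ===== SOURCE A (Python) =====
-- from typing import Dict, List
--
-- def enhance_skills(skills: List[str], role: str = "") -> List[str]:
--     if not skills:
--         return []
--     # Deduplicate, case-insensitive, prioritize role-relevant skills first
--     seen = set()
--     unique = []
--     for s in skills:
--         key = (s or "").strip()
--         if not key:
--             continue
--         low = key.lower()
--         if low not in seen:
--             seen.add(low)
--             unique.append(key)
--     if role:
--         role_low = role.lower()
--         unique.sort(key=lambda x: 0 if role_low in x.lower() else 1)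
--     return unique[:25]
-- ===== SOURCE B (Python) =====
-- def enhance_skills(skills, role=""):
--     # Single pass: dedup case-insensitively while stably partitioning into
--     # role-relevant and other skills; concatenate and cap at 25 (no sort).
--     role_low = role.lower()
--     seen = set()
--     rel, oth = [], []
--     for s in skills:
--         key = (s or "").strip()
--         if not key:
--             continue
--         low = key.lower()
--         if low in seen:
--             continue
--         seen.add(low)
--         if role and role_low in low:
--             rel.append(key)
--         else:
--             oth.append(key)
--     return (rel + oth)[:25]
-- ===== Notes on version B (the rewrite author's own statement) =====
-- stated objective: alternative
-- what changed: Replaces the dedup pass plus stable sort by a 0/1 key with a single pass that deduplicates and stably partitions into role-relevant and other skills, then concatenates; no sort.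
import Mathlib
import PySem

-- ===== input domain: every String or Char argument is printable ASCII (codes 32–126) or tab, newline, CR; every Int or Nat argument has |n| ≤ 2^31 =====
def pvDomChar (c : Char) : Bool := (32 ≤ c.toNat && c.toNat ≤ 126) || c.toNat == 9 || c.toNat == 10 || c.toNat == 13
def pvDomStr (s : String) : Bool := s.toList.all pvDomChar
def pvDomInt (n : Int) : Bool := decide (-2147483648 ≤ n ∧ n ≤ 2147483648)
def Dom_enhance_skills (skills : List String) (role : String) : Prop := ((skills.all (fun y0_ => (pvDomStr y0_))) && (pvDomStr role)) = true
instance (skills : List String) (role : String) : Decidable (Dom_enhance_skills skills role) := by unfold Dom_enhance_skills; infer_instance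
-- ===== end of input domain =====

-- B replaces A's dedup pass + stable sort (0/1 key) by one pass that dedups and stably
-- partitions into role-relevant / other skills, then concatenates (no sort; measured cost similar).

-- ===== PORT A =====
-- loop body of A's dedup loop (state: seen set, unique list)
def stepA (st : PySem.Set String × List String) (s : String) : PySem.Set String × List String :=
  let key := PySem.Str.strip s          -- (s or "").strip(): for a str s this is s.strip()
  if key = "" then st
  else
    let low := PySem.Str.lower key
    if PySem.Set.contains st.1 low then st
    else (PySem.Set.add st.1 low, st.2 ++ [key])

def enhance_skills (skills : List String) (role : String) : List String :=
  if skills = [] then []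
  else
    let r := skills.foldl stepA (PySem.Set.empty, [])
    let unique :=
      if role ≠ "" then
        PySem.List.sorted r.2
          (fun x => if PySem.Str.isIn (PySem.Str.lower role) (PySem.Str.lower x) then (0 : Int) else 1) false
      else r.2
    PySem.List.slice unique none (some 25)

-- ===== PORT B =====
-- loop body of B's single pass (state: seen set, rel list, oth list)
def stepB (role rl : String) (st : PySem.Set String × List String × List String) (s : String) :
    PySem.Set String × List String × List String :=
  let key := PySem.Str.strip s
  if key = "" then st
  else
    let low := PySem.Str.lower key
    if PySem.Set.contains st.1 low then st
    else
      if role ≠ "" ∧ PySem.Str.isIn rl low then (PySem.Set.add st.1 low, st.2.1 ++ [key], st.2.2)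
      else (PySem.Set.add st.1 low, st.2.1, st.2.2 ++ [key])

def enhance_skills_alt (skills : List String) (role : String) : List String :=
  let rl := PySem.Str.lower role
  let r := skills.foldl (stepB role rl) (PySem.Set.empty, [], [])
  (r.2.1 ++ r.2.2).take 25

-- ===== PRECONDITION & SPEC =====
def Spec_enhance_skills (skills : List String) (role : String) (out : List String) : Prop := out = enhance_skills_alt skills role
instance (skills : List String) (role : String) (out : List String) : Decidable (Spec_enhance_skills skills role out) := by unfold Spec_enhance_skills; infer_instance

-- ===== CLAIM (what is proved, stated in full; the proofs are below) =====
def Claim_equal_enhance_skills : Prop := ∀ (skills : List String) (role : String), Dom_enhance_skills skills role → Spec_enhance_skills skills role (enhance_skills skills role)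

-- ===== LEMMAS AND PROOFS =====

-- the 0/1 relevance predicate B partitions by (role ≠ "" included, so it also covers role = "")
def relev (role rl : String) (x : String) : Bool :=
  decide (role ≠ "" ∧ PySem.Str.isIn rl (PySem.Str.lower x))

-- insertBy walks past a prefix it does not insert before
lemma insertBy_append_false {α : Type} (bf : α → α → Bool) (x : α) (A B : List α)
    (h : ∀ a ∈ A, bf x a = false) :
    PySem.List.insertBy bf x (A ++ B) = A ++ PySem.List.insertBy bf x B := by
  induction A with
  | nil => rfl
  | cons a as ih =>
    simp only [List.cons_append, PySem.List.insertBy, h a (by simp)]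
    simp [ih (fun a ha => h a (by simp [ha]))]

-- B's loop computes exactly the relev/¬relev partition of A's loop output
lemma loopB_eq (role rl : String) (xs : List String) :
    ∀ (seen : PySem.Set String) (u : List String),
      xs.foldl (stepB role rl)
        (seen, u.filter (relev role rl), u.filter (fun x => ! relev role rl x)) =
      ((xs.foldl stepA (seen, u)).1,
        (xs.foldl stepA (seen, u)).2.filter (relev role rl),
        (xs.foldl stepA (seen, u)).2.filter (fun x => ! relev role rl x)) := by
  induction xs with
  | nil => intro seen u; rfl
  | cons x xs ih =>
    intro seen u
    simp only [List.foldl_cons, stepA, stepB]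
    by_cases hk : PySem.Str.strip x = ""
    · simp only [hk]; exact ih seen u
    · simp only [if_neg hk]
      by_cases hc : PySem.Set.contains seen (PySem.Str.lower (PySem.Str.strip x)) = true
      · simp only [hc]; exact ih seen u
      · simp only [Bool.not_eq_true] at hc
        simp only [hc, Bool.false_eq_true, if_false]
        by_cases hr : role ≠ "" ∧ PySem.Str.isIn rl (PySem.Str.lower (PySem.Str.strip x))
        · have hrel : relev role rl (PySem.Str.strip x) = true := by
            unfold relev; exact decide_eq_true hr
          simp only [if_pos hr]
          have := ih (PySem.Set.add seen (PySem.Str.lower (PySem.Str.strip x)))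
            (u ++ [PySem.Str.strip x])
          simpa [List.filter_append, hrel] using this
        · have hrel : relev role rl (PySem.Str.strip x) = false := by
            simp only [relev, decide_eq_false_iff_not]; exact hr
          simp only [if_neg hr]
          have := ih (PySem.Set.add seen (PySem.Str.lower (PySem.Str.strip x)))
            (u ++ [PySem.Str.strip x])
          simpa [List.filter_append, hrel] using this

-- stable insertion sort by a 0/1 key is the stable partition
lemma sort_partition (p : String → Bool) (xs : List String) :
    ∀ (A B : List String), (∀ a ∈ A, p a = true) → (∀ b ∈ B, p b = false) →
      xs.foldl (fun acc x =>
          PySem.List.insertBy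
            (fun a b => decide ((if p a then (0 : Int) else 1) < (if p b then (0 : Int) else 1))) x acc)
        (A ++ B)
      = (A ++ xs.filter p) ++ (B ++ xs.filter (fun x => ! p x)) := by
  induction xs with
  | nil => intro A B _ _; simp
  | cons x xs ih =>
    intro A B hA hB
    set bf : String → String → Bool :=
      fun a b => decide ((if p a then (0 : Int) else 1) < (if p b then (0 : Int) else 1)) with hbf
    simp only [List.foldl_cons]
    by_cases hp : p x = true
    · have hfalse : ∀ a ∈ A, bf x a = false := by
        intro a ha; simp [hbf, hp, hA a ha]
      have hins : PySem.List.insertBy bf x (A ++ B) = (A ++ [x]) ++ B := by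
        rw [insertBy_append_false bf x A B hfalse]
        cases B with
        | nil => simp [PySem.List.insertBy]
        | cons b bs =>
          have hb : bf x b = true := by simp [hbf, hp, hB b (by simp)]
          simp [PySem.List.insertBy, hb]
      have hA' : ∀ a ∈ A ++ [x], p a = true := by
        intro a ha
        rcases List.mem_append.1 ha with h | h
        · exact hA a h
        · rw [List.mem_singleton.1 h]; exact hp
      rw [hins, ih (A ++ [x]) B hA' hB]
      simp [hp, List.append_assoc]
    · have hfx : p x = false := by simpa using hp
      have hfalse : ∀ a ∈ A ++ B, bf x a = false := by
        intro a _; by_cases h : p a = true <;> simp [hbf, hfx, h]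
      have hins : PySem.List.insertBy bf x (A ++ B) = A ++ (B ++ [x]) := by
        have h0 := insertBy_append_false bf x (A ++ B) [] hfalse
        simp only [List.append_nil] at h0
        rw [h0]
        simp [PySem.List.insertBy, List.append_assoc]
      have hB' : ∀ b ∈ B ++ [x], p b = false := by
        intro b hb
        rcases List.mem_append.1 hb with h | h
        · exact hB b h
        · rw [List.mem_singleton.1 h]; exact hfx
      rw [hins, ih A (B ++ [x]) hA hB']
      simp [hfx, List.append_assoc]

-- ===== VERDICT (by name: the statement is the Claim_ definition above) =====
theorem enhance_skills_spec : Claim_equal_enhance_skills := by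
  intro skills role _
  unfold Spec_enhance_skills enhance_skills enhance_skills_alt
  set rl := PySem.Str.lower role with hrl
  have hloop := loopB_eq role rl skills PySem.Set.empty []
  simp only [List.filter_nil] at hloop
  set r := skills.foldl stepA (PySem.Set.empty, []) with hr
  by_cases hs : skills = []
  · subst hs; rfl
  · simp only [if_neg hs, hloop]
    have h25 : ∀ xs : List String, PySem.List.slice xs none (some 25) = xs.take 25 := by
      intro xs
      rw [show (25 : Int) = ((25 : Nat) : Int) from rfl, PySem.List.slice_to_natCast]
    by_cases hrole : role ≠ ""
    · have hp : ∀ x, relev role rl x = (PySem.Str.isIn rl (PySem.Str.lower x)) := by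
        intro x
        simp [relev, hrole]
      have hsort := sort_partition (fun x => PySem.Str.isIn rl (PySem.Str.lower x)) r.2
        [] [] (by simp) (by simp)
      simp only [List.nil_append] at hsort
      rw [if_pos hrole, PySem.List.sorted_eq_foldl_insertBy, hsort, h25 _,
        List.filter_congr (fun x (_ : x ∈ r.2) => hp x),
        List.filter_congr (fun x (_ : x ∈ r.2) => by simp [hp x] :
          ∀ x ∈ r.2, (fun x => ! relev role rl x) x = (fun x => ! PySem.Str.isIn rl (PySem.Str.lower x)) x)]
    · have hrole' : role = "" := by simpa using hrole
      have hp : ∀ x, relev role rl x = false := by intro x; simp [relev, hrole']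
      have h1 : List.filter (relev role rl) r.2 = [] :=
        List.filter_eq_nil_iff.2 (fun x _ => by simp [hp x])
      have h2 : List.filter (fun x => ! relev role rl x) r.2 = r.2 :=
        List.filter_eq_self.2 (fun x _ => by simp [hp x])
      simp only [if_neg hrole, h25 _, h1, h2, List.nil_append]
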